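-- pv_equiv track=rewrite | github.com/Pritish0173/Competitive-Programming | 10-mostfrequencydigit-Python/mostfrequentdigit.py | mostfrequentdigit
-- ===== SOURCE A (Python) =====
-- def mostfrequentdigit(n):
-- 	# your code goes here
-- 	a = abs(n)
-- 	s = str(a)
-- 	ss = set(s)
-- 	d = {}
-- 	for i in ss:
-- 		d[i] = s.count(i)
-- 	maximum = max(d.values())
-- 	l = [int(i) for i in d if d[i]==maximum]
-- 	return min(l)
-- ===== SOURCE B (Python) =====
-- def mostfrequentdigit(n):
--     m = abs(n)
--     counts = [0] * 10
--     while True: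
--         counts[m % 10] += 1
--         m //= 10
--         if m == 0:
--             break
--     best = 0
--     for d in range(1, 10):
--         if counts[d] > counts[best]:
--             best = d
--     return best
-- ===== Notes on version B (the rewrite author's own statement) =====
-- stated objective: alternative
-- what changed: A converts to a string, builds a dict of s.count per distinct character, takes max(d.values()) and min of the digits attaining it; B never touches strings: it extracts digits arithmetically (m%10, m//=10) into a fixed 10-slot bucket array and then does one strict-greater argmax scan over digits 0..9, so the smallest digit wins ties.
import Mathlib
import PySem

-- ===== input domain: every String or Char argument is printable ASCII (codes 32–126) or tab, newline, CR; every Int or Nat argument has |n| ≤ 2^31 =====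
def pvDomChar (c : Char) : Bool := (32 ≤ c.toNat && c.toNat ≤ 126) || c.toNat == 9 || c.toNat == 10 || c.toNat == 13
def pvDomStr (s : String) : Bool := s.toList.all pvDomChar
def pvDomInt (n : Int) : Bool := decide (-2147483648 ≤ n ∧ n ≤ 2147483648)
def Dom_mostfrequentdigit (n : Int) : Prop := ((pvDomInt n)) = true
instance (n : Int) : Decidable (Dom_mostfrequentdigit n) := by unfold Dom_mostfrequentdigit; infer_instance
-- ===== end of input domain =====

-- B replaces A's string/dict/max/min pipeline by arithmetic bucket counting (m%10, m//=10
-- into a 10-slot array) plus one strict-greater argmax scan over digits 0..9 (objective: alternative).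

-- ===== PORT A =====
def mostfrequentdigit (n : Int) : Int :=
  let a : Int := if n < 0 then -n else n                            -- a = abs(n)
  let s : List Char := PySem.Int.toChars a                          -- s = str(a)  (code points)
  let ss : PySem.Set Char := PySem.Set.ofList s                     -- ss = set(s)
  let d : PySem.Dict Char Int :=                                    -- for i in ss: d[i] = s.count(i)
    ss.foldl (fun d i => d.insert i ((PySem.Chars.count s [i] : Int))) PySem.Dict.empty
  let maximum : Int := (PySem.List.max? d.values (fun v => v)).getD 0
      -- max(d.values()); d is never empty (str(a) ≠ ''), so max never raises — default unreachable
  let l : List Int := (d.keys.filter (fun i => d.getD i 0 == maximum)).map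
      (fun i => (PySem.Int.ofChars? [i]).getD 0)
      -- [int(i) for i in d if d[i]==maximum]; d[i] always present, i a digit char so int(i) never raises
  (PySem.List.min? l (fun v => v)).getD 0                           -- min(l); l never empty — default unreachable

-- ===== PORT B =====
-- the while-True loop: counts[m % 10] += 1; m //= 10; stop when m == 0.
-- m = abs(n) is always ≥ 0, so it is tracked as a Nat (Python's % and // agree with Nat's on ≥ 0).
def pvBLoop (m : Nat) (counts : List Int) : List Int :=
  let counts' := PySem.List.pySetD counts ((m % 10 : Nat) : Int)
      (PySem.List.pyGetD counts ((m % 10 : Nat) : Int) 0 + 1)       -- counts[m % 10] += 1 (index always in range)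
  if h : m / 10 = 0 then counts' else pvBLoop (m / 10) counts'
termination_by m
decreasing_by omega

def mostfrequentdigit_alt (n : Int) : Int :=
  let m : Nat := (if n < 0 then -n else n).toNat                    -- m = abs(n)
  let counts : List Int := pvBLoop m (List.replicate 10 0)          -- counts = [0]*10; while loop
  (PySem.List.pyRange 1 10 1).foldl                                 -- for d in range(1, 10): …
    (fun best d =>
      if PySem.List.pyGetD counts d 0 > PySem.List.pyGetD counts best 0 then d else best)
    0                                                               -- best = 0; indices always in range

-- ===== PRECONDITION & SPEC =====
def Spec_mostfrequentdigit (n : Int) (out : Int) : Prop := out = mostfrequentdigit_alt n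
instance (n : Int) (out : Int) : Decidable (Spec_mostfrequentdigit n out) := by unfold Spec_mostfrequentdigit; infer_instance

-- ===== CLAIM (what is proved, stated in full; the proofs are below) =====
def Claim_equal_mostfrequentdigit : Prop := ∀ (n : Int), Dom_mostfrequentdigit n → Spec_mostfrequentdigit n (mostfrequentdigit n)

-- ===== LEMMAS AND PROOFS =====

theorem pvCountGoSingleton (c : Char) : ∀ (fuel : Nat) (l : List Char) (acc : Nat),
    l.length ≤ fuel → PySem.Chars.count.go [c] fuel l acc = acc + l.count c := by
  intro fuel
  induction fuel with
  | zero => intro l acc h; simp at h; simp [h, PySem.Chars.count.go]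
  | succ f ih =>
    intro l acc h
    cases l with
    | nil => simp [PySem.Chars.count.go]
    | cons x t =>
      simp only [PySem.Chars.count.go]
      by_cases hx : x = c
      · subst hx
        simp [ih t (acc+1) (by simpa using h)]
        omega
      · have : [c].isPrefixOf (x :: t) = false := by
          simp [List.isPrefixOf]
          exact fun h' => hx ((by simpa [BEq.beq] using h' : c = x)).symm
        simp [this, ih t acc (by simpa using Nat.le_of_succ_le_succ h), hx]

theorem pvCountSingleton (c : Char) (s : List Char) :
    PySem.Chars.count s [c] = s.count c := by
  simp [PySem.Chars.count]
  simpa using pvCountGoSingleton c s.length s 0 le_rfl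

def pvIsDig (c : Char) : Prop := ∃ k : Nat, k < 10 ∧ c = Nat.digitChar k

theorem pvToDigitsCoreDig : ∀ (fuel n : Nat) (ds : List Char), (∀ c ∈ ds, pvIsDig c) →
    ∀ c ∈ Nat.toDigitsCore 10 fuel n ds, pvIsDig c := by
  intro fuel
  induction fuel with
  | zero => intro n ds h; simpa [Nat.toDigitsCore] using h
  | succ f ih =>
    intro n ds h
    have hd : ∀ c ∈ (Nat.digitChar (n % 10) :: ds), pvIsDig c := by
      intro c hc
      rcases List.mem_cons.1 hc with rfl | hc
      · exact ⟨n % 10, Nat.mod_lt _ (by norm_num), rfl⟩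
      · exact h c hc
    simp only [Nat.toDigitsCore]
    split
    · exact hd
    · exact ih (n / 10) _ hd

theorem pvToDigitsDig (m : Nat) : ∀ c ∈ Nat.toDigits 10 m, pvIsDig c := by
  exact pvToDigitsCoreDig (m+1) m [] (by simp)

theorem pvOfCharsDigit (k : Nat) (hk : k < 10) :
    PySem.Int.ofChars? [Nat.digitChar k] = some (k : Int) := by
  interval_cases k <;> decide

theorem pvDigitCharInj (j k : Nat) (hj : j < 10) (hk : k < 10)
    (h : Nat.digitChar j = Nat.digitChar k) : j = k := by
  interval_cases j <;> interval_cases k <;> first | rfl | exact absurd h (by decide)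

-- the digits of m, least significant first, exactly as B's while loop extracts them
def pvDigits (m : Nat) : List Nat :=
  (m % 10) :: (if h : m / 10 = 0 then [] else pvDigits (m / 10))
termination_by m
decreasing_by omega

theorem pvDigitsLt : ∀ (m : Nat), ∀ x ∈ pvDigits m, x < 10 := by
  intro m
  induction m using Nat.strong_induction_on with
  | _ m ih =>
    rw [pvDigits]
    intro x hx
    rcases List.mem_cons.1 hx with rfl | hx
    · omega
    · split at hx
      · simp at hx
      · exact ih (m / 10) (by omega) x hx

theorem pvToDigitsCoreEq : ∀ (n : Nat) (fuel : Nat) (ds : List Char), n < fuel →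
    Nat.toDigitsCore 10 fuel n ds = ((pvDigits n).map Nat.digitChar).reverse ++ ds := by
  intro n
  induction n using Nat.strong_induction_on with
  | _ n ih =>
    intro fuel ds hf
    cases fuel with
    | zero => omega
    | succ f =>
      rw [pvDigits]
      simp only [Nat.toDigitsCore]
      by_cases h : n / 10 = 0
      · simp [h]
      · rw [if_neg h, dif_neg h,
          ih (n / 10) (by omega) f (Nat.digitChar (n % 10) :: ds) (by omega)]
        simp

theorem pvToDigitsEq (m : Nat) :
    Nat.toDigits 10 m = ((pvDigits m).map Nat.digitChar).reverse := by
  have := pvToDigitsCoreEq m (m + 1) [] (by omega)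
  simpa [Nat.toDigits] using this

theorem pvToDigitsNeNil (m : Nat) : Nat.toDigits 10 m ≠ [] := by
  rw [pvToDigitsEq, pvDigits]; simp

theorem pvCountMapDigitChar (d : Nat) (hd : d < 10) : ∀ (l : List Nat), (∀ x ∈ l, x < 10) →
    (l.map Nat.digitChar).count (Nat.digitChar d) = l.count d := by
  intro l
  induction l with
  | nil => simp
  | cons x t ih =>
    intro h
    have ht := ih (fun y hy => h y (List.mem_cons_of_mem _ hy))
    by_cases hx : x = d
    · subst hx; simp [List.count_cons, ht]
    · have : ¬ (Nat.digitChar x = Nat.digitChar d) := fun hc =>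
        hx (pvDigitCharInj x d (h x List.mem_cons_self) hd hc)
      simp [List.count_cons, ht, hx, this]

-- count of digitChar d in str(m) equals count of d among B's arithmetic digits
theorem pvCountDigits (m d : Nat) (hd : d < 10) :
    (Nat.toDigits 10 m).count (Nat.digitChar d) = (pvDigits m).count d := by
  rw [pvToDigitsEq, List.count_reverse]
  exact pvCountMapDigitChar d hd (pvDigits m) (pvDigitsLt m)

theorem pvBLoopGetD : ∀ (m : Nat) (counts : List Int), counts.length = 10 →
    ∀ d : Nat, d < 10 →
    (pvBLoop m counts).getD d 0 = counts.getD d 0 + ((pvDigits m).count d : Int) := by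
  intro m
  induction m using Nat.strong_induction_on with
  | _ m ih =>
    intro counts hlen d hd
    have hm10 : m % 10 < 10 := by omega
    have hset : ∀ j : Nat, j < 10 →
        (counts.set (m % 10) (counts.getD (m % 10) 0 + 1)).getD j 0 =
          if j = m % 10 then counts.getD (m % 10) 0 + 1 else counts.getD j 0 := by
      intro j hj
      have hj' : j < counts.length := by omega
      have hj2 : j < (counts.set (m % 10) (counts.getD (m % 10) 0 + 1)).length := by
        simpa using hj'
      rw [List.getD_eq_getElem _ _ hj2, List.getElem_set]
      by_cases hje : j = m % 10
      · simp [hje]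
      · rw [if_neg (fun hc => hje hc.symm), if_neg hje, List.getD_eq_getElem _ _ hj']
    have hcount : ((pvDigits m).count d : Int) =
        (if d = m % 10 then 1 else 0)
          + (if m / 10 = 0 then 0 else ((pvDigits (m / 10)).count d : Int)) := by
      rw [pvDigits]
      by_cases h : m / 10 = 0
      · rw [dif_pos h, if_pos h]
        by_cases hde : d = m % 10
        · simp [hde]
        · simp [hde, List.count_cons]
          omega
      · rw [dif_neg h, if_neg h]
        simp only [List.count_cons, beq_iff_eq]
        by_cases hde : d = m % 10
        · rw [if_pos hde, if_pos hde.symm]; push_cast; omega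
        · rw [if_neg hde, if_neg (fun hc => hde hc.symm)]; push_cast; omega
    rw [pvBLoop]
    simp only [PySem.List.pySetD_natCast, PySem.List.pyGetD_natCast]
    by_cases h : m / 10 = 0
    · rw [dif_pos h, hset d hd, hcount, if_pos h]
      by_cases hde : d = m % 10
      · rw [if_pos hde, if_pos hde, hde]; ring
      · rw [if_neg hde, if_neg hde]; ring
    · rw [dif_neg h,
        ih (m / 10) (by omega) _ (by simpa using hlen) d hd, hset d hd, hcount, if_neg h]
      by_cases hde : d = m % 10
      · rw [if_pos hde, if_pos hde, hde]; ring
      · rw [if_neg hde, if_neg hde]; ring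

-- generalized first-argmax fold (keeps the earlier element on ties)
def pvPk {α : Type} (cnt : α → Int) (c x : α) : α := if cnt x > cnt c then x else c

theorem pvBestFacts {α : Type} [LinearOrder α] (cnt : α → Int) : ∀ (xs : List α) (c : α),
    (∀ y ∈ xs, c < y) → xs.Pairwise (· < ·) →
    ((xs.foldl (pvPk cnt) c = c ∨ xs.foldl (pvPk cnt) c ∈ xs)
      ∧ cnt c ≤ cnt (xs.foldl (pvPk cnt) c)
      ∧ (∀ y ∈ xs, cnt y ≤ cnt (xs.foldl (pvPk cnt) c))
      ∧ (∀ y, (y = c ∨ y ∈ xs) → cnt y = cnt (xs.foldl (pvPk cnt) c) → xs.foldl (pvPk cnt) c ≤ y)) := by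
  intro xs
  induction xs with
  | nil =>
    intro c _ _
    refine ⟨Or.inl rfl, le_rfl, by simp, ?_⟩
    intro y hy hcy
    rcases hy with rfl | h
    · exact le_rfl
    · simp at h
  | cons x t ih =>
    intro c hlt hp
    have hxt : ∀ y ∈ t, x < y := by
      intro y hy; exact (List.pairwise_cons.1 hp).1 y hy
    have hpt : t.Pairwise (· < ·) := (List.pairwise_cons.1 hp).2
    simp only [List.foldl_cons]
    by_cases h : cnt x > cnt c
    · have hstep : pvPk cnt c x = x := if_pos h
      rw [hstep]
      obtain ⟨m1, m2, m3, m4⟩ := ih x hxt hpt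
      refine ⟨?_, ?_, ?_, ?_⟩
      · rcases m1 with hm | hm
        · rw [hm]; exact Or.inr List.mem_cons_self
        · exact Or.inr (List.mem_cons_of_mem _ hm)
      · exact le_of_lt (lt_of_lt_of_le h m2)
      · intro y hy
        rcases List.mem_cons.1 hy with rfl | hy
        · exact m2
        · exact m3 y hy
      · intro y hy hcy
        rcases hy with rfl | hy
        · exact absurd hcy (by omega)
        · rcases List.mem_cons.1 hy with rfl | hy
          · exact m4 y (Or.inl rfl) hcy
          · exact m4 y (Or.inr hy) hcy
    · have hstep : pvPk cnt c x = c := if_neg h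
      rw [hstep]
      have hct : ∀ y ∈ t, c < y := by intro y hy; exact hlt y (List.mem_cons_of_mem _ hy)
      obtain ⟨m1, m2, m3, m4⟩ := ih c hct hpt
      refine ⟨?_, m2, ?_, ?_⟩
      · rcases m1 with hm | hm
        · exact Or.inl hm
        · exact Or.inr (List.mem_cons_of_mem _ hm)
      · intro y hy
        rcases List.mem_cons.1 hy with rfl | hy
        · omega
        · exact m3 y hy
      · intro y hy hcy
        rcases hy with rfl | hy
        · exact m4 y (Or.inl rfl) hcy
        · rcases List.mem_cons.1 hy with rfl | hy
          · have hbc : t.foldl (pvPk cnt) c ≤ c := m4 c (Or.inl rfl) (by omega)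
            exact le_of_lt (lt_of_le_of_lt hbc (hlt y List.mem_cons_self))
          · exact m4 y (Or.inr hy) hcy

theorem pvMain (n : Int) : mostfrequentdigit n = mostfrequentdigit_alt n := by
  unfold mostfrequentdigit mostfrequentdigit_alt
  have ha0 : ¬ ((if n < 0 then -n else n) < 0) := by split <;> omega
  set a : Int := if n < 0 then -n else n with hadef
  have hs : PySem.Int.toChars a = Nat.toDigits 10 a.toNat := by
    simp [PySem.Int.toChars, ha0]
  set mN : Nat := a.toNat with hmN
  set s : List Char := PySem.Int.toChars a with hsdef
  have hne : s ≠ [] := by rw [hs]; exact pvToDigitsNeNil mN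
  have hdig : ∀ c ∈ s, pvIsDig c := by rw [hs]; exact pvToDigitsDig mN
  simp only [pvCountSingleton]
  set cnt : Char → Int := fun c => (s.count c : Int) with hcnt
  set g : Char → Int := fun i => (PySem.Int.ofChars? [i]).getD 0 with hg
  set ss : List Char := PySem.Set.ofList s with hss
  have hstepA : (fun (dd : PySem.Dict Char Int) i => dd.insert i ((List.count i s : Int)))
      = (fun dd i => dd.insert i (cnt i)) := rfl
  rw [hstepA]
  -- ===== A side: the dict, its maximum, and the filtered list =====
  have hnodup : ss.Nodup := PySem.Set.nodup_ofList s
  have hitems : (ss.foldl (fun d i => d.insert i (cnt i))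
      (PySem.Dict.empty : PySem.Dict Char Int)).items = ss.map (fun i => (i, cnt i)) := by
    have := PySem.Dict.items_foldl_insert_fresh (l := ss) (k := fun i => i) (v := cnt)
      (d := (PySem.Dict.empty : PySem.Dict Char Int))
      (by intro a _; exact PySem.Dict.contains_empty a)
      (by simpa using hnodup)
    simpa using this
  set d : PySem.Dict Char Int := ss.foldl (fun d i => d.insert i (cnt i)) PySem.Dict.empty with hd
  have hkeys : d.keys = ss := by
    simp only [PySem.Dict.keys, hitems, List.map_map]
    have : ((fun p : Char × Int => p.1) ∘ fun i => (i, cnt i)) = id := rfl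
    rw [this, List.map_id]
  have hvals : d.values = ss.map cnt := by
    simp only [PySem.Dict.values, hitems, List.map_map]
    rfl
  have hknd : d.keys.Nodup := by rw [hkeys]; exact hnodup
  have hget : ∀ i ∈ ss, d.getD i 0 = cnt i := by
    intro i hi
    have hmem : (i, cnt i) ∈ d.items := by
      rw [hitems]; exact List.mem_map_of_mem hi
    exact PySem.Dict.getD_of_mem_items d hmem hknd 0
  have hmemss : ∀ c, c ∈ ss ↔ c ∈ s := fun c => PySem.Set.mem_ofList s c
  have hssne : ss ≠ [] := by
    cases hcs : s with
    | nil => exact absurd hcs hne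
    | cons c cs =>
      intro hz
      have : c ∈ ss := (hmemss c).2 (by rw [hcs]; exact List.mem_cons_self)
      rw [hz] at this; simp at this
  have hcnt1 : ∀ c ∈ ss, 1 ≤ cnt c := by
    intro c hc
    have : 0 < s.count c := List.count_pos_iff.2 ((hmemss c).1 hc)
    simp only [hcnt]; exact_mod_cast this
  obtain ⟨M, hM⟩ : ∃ M, PySem.List.max? (ss.map cnt) (fun v => v) = some M := by
    cases hq : PySem.List.max? (ss.map cnt) (fun v => v) with
    | none =>
      exact absurd (List.map_eq_nil_iff.1 ((PySem.List.max?_eq_none_iff _ _).1 hq)) hssne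
    | some m => exact ⟨m, rfl⟩
  obtain ⟨i0, hi0mem, hi0⟩ : ∃ i ∈ ss, cnt i = M := by
    have := PySem.List.max?_mem hM
    obtain ⟨i, hi, hiv⟩ := List.mem_map.1 this
    exact ⟨i, hi, hiv⟩
  have hMmax : ∀ i ∈ ss, cnt i ≤ M := by
    intro i hi
    have := PySem.List.max?_isMax hM (cnt i) (List.mem_map_of_mem hi)
    simpa using this
  have hM1 : 1 ≤ M := le_trans (hcnt1 i0 hi0mem) (le_of_eq hi0)
  have hfilter : d.keys.filter (fun i => d.getD i 0 == (PySem.List.max? d.values (fun v => v)).getD 0)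
      = ss.filter (fun i => cnt i == M) := by
    rw [hvals, hM, hkeys]
    refine List.filter_congr ?_
    intro i hi
    simp only [hget i hi, Option.getD_some]
  -- ===== B side: the bucket array and the argmax scan over 0..9 =====
  set counts : List Int := pvBLoop mN (List.replicate 10 0) with hcounts
  set F : Int → Int := fun t => PySem.List.pyGetD counts t 0 with hFdef
  have hF : ∀ j : Nat, j < 10 → F ((j : Nat) : Int) = (s.count (Nat.digitChar j) : Int) := by
    intro j hj
    have hrep : (List.replicate 10 (0 : Int)).getD j 0 = 0 := by
      rw [List.getD_eq_getElem _ _ (by simp; omega)]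
      interval_cases j <;> rfl
    rw [hFdef]
    simp only [PySem.List.pyGetD_natCast]
    rw [hcounts, pvBLoopGetD mN _ (by simp) j hj, hrep, hs, pvCountDigits mN j hj]
    simp
  set idx : List Int := PySem.List.pyRange 1 10 1 with hidx
  have hidxlit : idx = [1, 2, 3, 4, 5, 6, 7, 8, 9] := by rw [hidx]; decide
  have hfun : (fun (best t : Int) =>
      if PySem.List.pyGetD counts t 0 > PySem.List.pyGetD counts best 0 then t else best)
      = pvPk F := rfl
  rw [hfun]
  obtain ⟨m1, m2, m3, m4⟩ := pvBestFacts F idx 0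
    (by rw [hidxlit]; decide) (by rw [hidxlit]; decide)
  set k : Int := idx.foldl (pvPk F) 0 with hk
  have hmem09 : ∀ j : Nat, j < 10 → ((j : Nat) : Int) = 0 ∨ ((j : Nat) : Int) ∈ idx := by
    intro j hj
    rw [hidxlit]
    interval_cases j <;> simp
  have hk09 : 0 ≤ k ∧ k.toNat < 10 ∧ ((k.toNat : Nat) : Int) = k := by
    rcases m1 with hm | hm
    · rw [hm]; exact ⟨le_refl 0, by norm_num, rfl⟩
    · rw [hidxlit] at hm
      simp at hm
      exact ⟨by omega, by omega, by omega⟩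
  set kN : Nat := k.toNat with hkN
  have hkN10 : kN < 10 := hk09.2.1
  have hkcast : ((kN : Nat) : Int) = k := hk09.2.2
  have hFk : F k = (s.count (Nat.digitChar kN) : Int) := by
    rw [← hkcast]; exact hF kN hkN10
  -- every distinct char of s is digitChar j with its count = F j ≤ F k, so M ≤ F k
  have hchar : ∀ i ∈ ss, ∃ j : Nat, j < 10 ∧ i = Nat.digitChar j := by
    intro i hi
    obtain ⟨j, hj, hje⟩ := hdig i ((hmemss i).1 hi)
    exact ⟨j, hj, hje⟩
  have hcntF : ∀ i ∈ ss, ∀ j : Nat, j < 10 → i = Nat.digitChar j → cnt i = F ((j : Nat) : Int) := by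
    intro i _ j hj hje
    rw [hF j hj, hje]
  have hMleFk : M ≤ F k := by
    obtain ⟨j0, hj0, hje0⟩ := hchar i0 hi0mem
    have h1 : cnt i0 = F ((j0 : Nat) : Int) := hcntF i0 hi0mem j0 hj0 hje0
    rcases hmem09 j0 hj0 with hz | hmz
    · calc M = F ((j0 : Nat) : Int) := by rw [← h1, hi0]
        _ = F 0 := by rw [hz]
        _ ≤ F k := m2
    · calc M = F ((j0 : Nat) : Int) := by rw [← h1, hi0]
        _ ≤ F k := m3 _ hmz
  have hbmem : Nat.digitChar kN ∈ ss := by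
    by_contra hno
    have h0 : s.count (Nat.digitChar kN) = 0 := by
      rw [List.count_eq_zero]
      exact fun hmem => hno ((hmemss _).2 hmem)
    have : F k = 0 := by rw [hFk, h0]; simp
    omega
  have hFkM : F k = M := by
    have h1 : F k ≤ M := by
      have := hMmax (Nat.digitChar kN) hbmem
      rw [hcnt] at this
      rw [hFk]
      exact_mod_cast this
    omega
  -- the filtered list: k is one of its values and a lower bound for all of them
  rw [hfilter]
  set l : List Int := (ss.filter (fun i => cnt i == M)).map g with hl
  have hkl : k ∈ l := by
    rw [hl]
    have hfilt : Nat.digitChar kN ∈ ss.filter (fun i => cnt i == M) := by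
      refine List.mem_filter.2 ⟨hbmem, ?_⟩
      have : cnt (Nat.digitChar kN) = M := by
        rw [hcnt]
        rw [hFk] at hFkM
        exact hFkM
      simp [this]
    have hgk : g (Nat.digitChar kN) = k := by
      rw [hg]
      simp only [pvOfCharsDigit kN hkN10, Option.getD_some]
      exact hkcast
    rw [← hgk]
    exact List.mem_map_of_mem hfilt
  have hlow : ∀ v ∈ l, k ≤ v := by
    intro v hv
    obtain ⟨i, hif, rfl⟩ := List.mem_map.1 hv
    obtain ⟨hiss, hieq⟩ := List.mem_filter.1 hif
    obtain ⟨j, hj, hje⟩ := hchar i hiss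
    have hieq' : cnt i = M := by exact_mod_cast (beq_iff_eq.1 hieq)
    have hFj : F ((j : Nat) : Int) = F k := by
      rw [← hcntF i hiss j hj hje, hieq', hFkM]
    have hgi : g i = ((j : Nat) : Int) := by
      rw [hg, hje]
      simp [pvOfCharsDigit j hj]
    have hkj : k ≤ ((j : Nat) : Int) := by
      rcases hmem09 j hj with hz | hmz
      · exact m4 _ (Or.inl hz) hFj
      · exact m4 _ (Or.inr hmz) hFj
    rw [hgi]
    exact hkj
  obtain ⟨v, hv⟩ : ∃ v, PySem.List.min? l (fun v => v) = some v := by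
    cases hq : PySem.List.min? l (fun v => v) with
    | none =>
      rw [PySem.List.min?_eq_none_iff] at hq
      rw [hq] at hkl; simp at hkl
    | some m => exact ⟨m, rfl⟩
  have hveq : v = k := by
    have hvm : v ∈ l := PySem.List.min?_mem hv
    have h1 : v ≤ k := by simpa using PySem.List.min?_isMin hv k hkl
    have h2 : k ≤ v := hlow v hvm
    omega
  rw [hv]
  simp only [Option.getD_some, hveq]

-- ===== VERDICT (by name: the statement is the Claim_ definition above) =====
theorem mostfrequentdigit_spec : Claim_equal_mostfrequentdigit := by
  intro n _
  unfold Spec_mostfrequentdigit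
  exact pvMain n
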